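-- pv_equiv track=rewrite | github.com/khritish17/Pastport | diff_algorithm.py | generate_commit_data
-- ===== SOURCE A (Python) =====
-- def generate_commit_data(old_text, new_text, lcs):
--     # make sure to deal with old_text/new_text which are empty([]), becoz line 45, 47
--     # old text, new text are arrays
--     old_index = []
--     new_index = []
--     for word, old_ind, new_ind in lcs:
--         old_index.append(old_ind)
--         new_index.append(new_ind)
--
--     insertion = []
--     for i in range(len(new_text)):
--         if i not in new_index:
--             insertion.append((new_text[i], i))
--
--     deletion = []
--
--     for i in range(len(old_text)):
--         if i not in old_index:
--             deletion.append((old_text[i], i))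
--     return insertion, deletion
-- ===== SOURCE B (Python) =====
-- def generate_commit_data(old_text, new_text, lcs):
--     # Gap-expansion: sort the distinct in-range matched indices once, then emit
--     # the unmatched (line, index) pairs between consecutive matches, no per-line
--     # membership scan.
--     def missing(text, idxs):
--         matched = sorted({k for k in idxs if 0 <= k < len(text)})
--         out = []
--         start = 0
--         for k in matched:
--             for i in range(start, k):
--                 out.append((text[i], i))
--             start = k + 1
--         for i in range(start, len(text)):
--             out.append((text[i], i))
--         return out
--     return missing(new_text, [t[2] for t in lcs]), missing(old_text, [t[1] for t in lcs])
-- ===== Notes on version B (the rewrite author's own statement) =====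
-- stated objective: faster
-- what changed: Replaces the per-line 'i not in index_list' membership scan with a one-off sort+dedup of the matched indices followed by gap expansion between consecutive matches.
import Mathlib
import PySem

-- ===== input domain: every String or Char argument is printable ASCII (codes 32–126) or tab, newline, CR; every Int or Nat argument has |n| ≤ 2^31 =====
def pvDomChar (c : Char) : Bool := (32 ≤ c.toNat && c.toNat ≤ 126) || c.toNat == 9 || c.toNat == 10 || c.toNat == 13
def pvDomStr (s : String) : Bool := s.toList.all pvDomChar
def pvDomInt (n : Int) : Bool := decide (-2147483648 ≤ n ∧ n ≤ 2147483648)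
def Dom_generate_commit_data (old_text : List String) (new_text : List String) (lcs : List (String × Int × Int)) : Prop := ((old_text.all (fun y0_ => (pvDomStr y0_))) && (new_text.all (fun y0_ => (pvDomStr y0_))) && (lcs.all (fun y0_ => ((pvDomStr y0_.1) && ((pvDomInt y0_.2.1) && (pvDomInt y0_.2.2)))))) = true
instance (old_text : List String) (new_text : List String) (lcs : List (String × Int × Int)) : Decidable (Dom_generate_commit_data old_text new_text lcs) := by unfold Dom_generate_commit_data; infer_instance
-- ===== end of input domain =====

-- B replaces A's per-line membership scan over the lcs index lists with one sort+dedup of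
-- the matched indices followed by gap expansion between consecutive matches (objective: faster).

-- ===== PORT A =====
def generate_commit_data (old_text : List String) (new_text : List String) (lcs : List (String × Int × Int)) : (List (String × Int)) × (List (String × Int)) :=
  -- old_index/new_index built by one loop over lcs
  let idx := lcs.foldl (fun (acc : List Int × List Int) t => (acc.1 ++ [t.2.1], acc.2 ++ [t.2.2])) ([], [])
  let old_index := idx.1
  let new_index := idx.2
  let insertion := (PySem.List.pyRange 0 (PySem.List.len new_text) 1).foldl
    (fun acc i => if ¬ (i ∈ new_index) then acc ++ [(PySem.List.pyGetD new_text i "", i)] else acc) []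
  let deletion := (PySem.List.pyRange 0 (PySem.List.len old_text) 1).foldl
    (fun acc i => if ¬ (i ∈ old_index) then acc ++ [(PySem.List.pyGetD old_text i "", i)] else acc) []
  (insertion, deletion)

-- ===== PORT B =====
-- inner loops 'for i in range(start, k): out.append((text[i], i))' of Source B, one gap per matched index
def pvGaps (text : List String) (start : Int) (matched : List Int) : List (String × Int) :=
  match matched with
  | [] => (PySem.List.pyRange start (PySem.List.len text) 1).map (fun i => (PySem.List.pyGetD text i "", i))
  | k :: rest => (PySem.List.pyRange start k 1).map (fun i => (PySem.List.pyGetD text i "", i)) ++ pvGaps text (k + 1) rest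

-- missing(text, idxs) of Source B: sorted set of in-range indices, then gap expansion
def pvMissing (text : List String) (idxs : List Int) : List (String × Int) :=
  pvGaps text 0 (PySem.List.sorted (PySem.Set.ofList (idxs.filter (fun k => decide (0 ≤ k ∧ k < PySem.List.len text)))) (fun x => x) false)

def generate_commit_data_alt (old_text : List String) (new_text : List String) (lcs : List (String × Int × Int)) : (List (String × Int)) × (List (String × Int)) :=
  (pvMissing new_text (lcs.map (fun t => t.2.2)), pvMissing old_text (lcs.map (fun t => t.2.1)))

-- ===== PRECONDITION & SPEC =====
def Spec_generate_commit_data (old_text : List String) (new_text : List String) (lcs : List (String × Int × Int)) (out : (List (String × Int)) × (List (String × Int))) : Prop := out = generate_commit_data_alt old_text new_text lcs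
instance (old_text : List String) (new_text : List String) (lcs : List (String × Int × Int)) (out : (List (String × Int)) × (List (String × Int))) : Decidable (Spec_generate_commit_data old_text new_text lcs out) := by unfold Spec_generate_commit_data; infer_instance

-- ===== CLAIM (what is proved, stated in full; the proofs are below) =====
def Claim_equal_generate_commit_data : Prop := ∀ (old_text : List String) (new_text : List String) (lcs : List (String × Int × Int)), Dom_generate_commit_data old_text new_text lcs → Spec_generate_commit_data old_text new_text lcs (generate_commit_data old_text new_text lcs)

-- ===== LEMMAS AND PROOFS =====

-- gap expansion over a strictly increasing list of in-range matched indices = filter of the full range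
theorem pvGaps_eq_filter (text : List String) (start : Int) (m : List Int)
    (hs : m.Pairwise (· < ·)) (hlo : ∀ k ∈ m, start ≤ k) (hhi : ∀ k ∈ m, k < PySem.List.len text) :
    pvGaps text start m =
      ((PySem.List.pyRange start (PySem.List.len text) 1).filter (fun i => decide (¬ i ∈ m))).map
        (fun i => (PySem.List.pyGetD text i "", i)) := by
  induction m generalizing start with
  | nil =>
    simp [pvGaps]
  | cons k rest ih =>
    have hk1 : start ≤ k := hlo k (by simp)
    have hk2 : k < PySem.List.len text := hhi k (by simp)
    have hrest : ∀ j ∈ rest, k < j := by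
      intro j hj; exact (List.pairwise_cons.mp hs).1 j hj
    rw [pvGaps, PySem.List.pyRange_one_append start k (PySem.List.len text) hk1 (le_of_lt hk2),
        PySem.List.pyRange_one_cons hk2]
    rw [List.filter_append, List.filter_cons]
    have hknotin : (decide (¬ k ∈ (k :: rest)) = true) = False := by simp
    simp only [hknotin, if_false]
    rw [List.map_append]
    congr 1
    · -- the gap before k: every element of pyRange start k is kept
      have : (PySem.List.pyRange start k 1).filter (fun i => decide (¬ i ∈ (k :: rest))) =
          PySem.List.pyRange start k 1 := by
        apply List.filter_eq_self.mpr
        intro i hi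
        have hik : i < k := (PySem.List.mem_pyRange_one.mp hi).2
        simp only [decide_eq_true_eq, List.mem_cons]
        push Not
        exact ⟨fun h => absurd h (ne_of_lt hik), fun hj => absurd (hrest i hj) (not_lt.mpr (le_of_lt hik))⟩
      rw [this]
    · -- the tail: membership in (k :: rest) and rest agree beyond k
      have hcongr : (PySem.List.pyRange (k + 1) (PySem.List.len text) 1).filter (fun i => decide (¬ i ∈ (k :: rest))) =
          (PySem.List.pyRange (k + 1) (PySem.List.len text) 1).filter (fun i => decide (¬ i ∈ rest)) := by
        apply List.filter_congr
        intro i hi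
        have hik : k + 1 ≤ i := (PySem.List.mem_pyRange_one.mp hi).1
        simp only [decide_eq_decide, List.mem_cons]
        constructor
        · intro h; exact fun hj => h (Or.inr hj)
        · intro h hor
          rcases hor with h1 | h2
          · omega
          · exact h h2
      rw [hcongr, ih (k + 1) (List.pairwise_cons.mp hs).2 (fun j hj => by have := hrest j hj; omega)
            (fun j hj => hhi j (by simp [hj]))]

-- A's membership-filtered range = B's pvMissing
theorem pvMissing_eq (text : List String) (idxs : List Int) :
    ((PySem.List.pyRange 0 (PySem.List.len text) 1).filter (fun i => decide (¬ i ∈ idxs))).map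
        (fun i => (PySem.List.pyGetD text i "", i)) = pvMissing text idxs := by
  unfold pvMissing
  set m := PySem.List.sorted (PySem.Set.ofList (idxs.filter (fun k => decide (0 ≤ k ∧ k < PySem.List.len text)))) (fun x => x) false with hm
  have hmem : ∀ i, i ∈ m ↔ i ∈ idxs ∧ 0 ≤ i ∧ i < PySem.List.len text := by
    intro i
    rw [hm, PySem.List.mem_sorted, PySem.Set.mem_ofList, List.mem_filter]
    simp
  have hpair : m.Pairwise (· < ·) := by
    rw [hm]; exact PySem.List.sorted_ofList_pairwise_lt _
  rw [pvGaps_eq_filter text 0 m hpair (fun k hk => ((hmem k).mp hk).2.1) (fun k hk => ((hmem k).mp hk).2.2)]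
  congr 1
  apply List.filter_congr
  intro i hi
  have hrange := PySem.List.mem_pyRange_one.mp hi
  simp only [decide_eq_decide]
  rw [hmem i]
  constructor
  · intro h ⟨h1, _⟩; exact h h1
  · intro h h1; exact h ⟨h1, hrange.1, hrange.2⟩

-- ===== VERDICT (by name: the statement is the Claim_ definition above) =====
theorem generate_commit_data_spec : Claim_equal_generate_commit_data := by
  intro old_text new_text lcs _
  unfold Spec_generate_commit_data generate_commit_data generate_commit_data_alt
  rw [PySem.List.foldl_prod_mk (f := fun acc (t : String × Int × Int) => acc ++ [t.2.1])
        (g := fun acc (t : String × Int × Int) => acc ++ [t.2.2])]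
  simp only [PySem.List.foldl_append_singleton_eq_map, List.nil_append]
  rw [PySem.List.foldl_append_ite (p := fun i => ¬ i ∈ lcs.map (fun t : String × Int × Int => t.2.2)),
      PySem.List.foldl_append_ite (p := fun i => ¬ i ∈ lcs.map (fun t : String × Int × Int => t.2.1))]
  simp only [List.nil_append]
  rw [pvMissing_eq new_text (lcs.map (fun t => t.2.2)), pvMissing_eq old_text (lcs.map (fun t => t.2.1))]
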